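-- pv_equiv track=rewrite | github.com/RiboswitchClassifier/riboflow | build/lib/riboflow/__init__.py | clean_sequnces
-- ===== SOURCE A (Python) =====
-- def clean_sequnces(sequences):
--     existing_letter = ['R', 'Y', 'M', 'K', 'S', 'W', 'H', 'B', 'V', 'D']
--     new_letter      = ['G', 'T', 'A', 'G', 'G', 'A', 'A', 'G', 'G', 'G']
--     length_sequences = len(sequences)
--     for old, new in zip(existing_letter, new_letter):
--         for i in range(length_sequences):
--             sequences[i] = sequences[i].replace(old, new)
--     return sequences
-- ===== SOURCE B (Python) =====
-- def clean_sequnces(sequences):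
--     table = str.maketrans("RYMKSWHBVD", "GTAGGAAGGG")
--     for i in range(len(sequences)):
--         sequences[i] = sequences[i].translate(table)
--     return sequences
-- ===== Notes on version B (the rewrite author's own statement) =====
-- stated objective: faster
-- what changed: Replaces A's ten sequential .replace passes over every sequence with one translation table built once via str.maketrans and a single .translate pass per sequence (same in-place list mutation).
import Mathlib
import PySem

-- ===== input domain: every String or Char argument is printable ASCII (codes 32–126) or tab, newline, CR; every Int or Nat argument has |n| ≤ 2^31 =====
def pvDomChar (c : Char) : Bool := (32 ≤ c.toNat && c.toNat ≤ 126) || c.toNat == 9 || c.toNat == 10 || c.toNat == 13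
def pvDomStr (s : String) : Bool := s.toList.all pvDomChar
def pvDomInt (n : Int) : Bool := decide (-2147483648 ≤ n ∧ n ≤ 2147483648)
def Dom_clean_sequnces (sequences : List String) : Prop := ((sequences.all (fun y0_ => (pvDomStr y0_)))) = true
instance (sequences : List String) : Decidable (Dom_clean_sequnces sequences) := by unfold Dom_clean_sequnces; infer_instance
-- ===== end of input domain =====

-- B builds one translation table and makes a single pass per sequence instead of A's ten sequential
-- replace passes. Both Pythons mutate the argument list in place; the equivalence proved is about the return value.

-- ===== PORT A =====
-- A: for each (old, new) pair in turn, replace old by new in every sequence.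
def clean_sequnces (sequences : List String) : List String :=
  let existing_letter : List String := ["R", "Y", "M", "K", "S", "W", "H", "B", "V", "D"]
  let new_letter : List String := ["G", "T", "A", "G", "G", "A", "A", "G", "G", "G"]
  (existing_letter.zip new_letter).foldl
    (fun seqs p => seqs.map (fun s => PySem.Str.replace s p.1 p.2)) sequences

-- ===== PORT B =====
-- the translation table, built once (port of str.maketrans("RYMKSWHBVD", "GTAGGAAGGG"))
def pvTable : List (Char × Char) :=
  [('R','G'),('Y','T'),('M','A'),('K','G'),('S','G'),('W','A'),('H','A'),('B','G'),('V','G'),('D','G')]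

def pvTranslate (c : Char) : Char := (pvTable.lookup c).getD c

-- B: one pass per sequence through the table (port of s.translate(table))
def clean_sequnces_alt (sequences : List String) : List String :=
  sequences.map (fun s => String.ofList (s.toList.map pvTranslate))

-- ===== PRECONDITION & SPEC =====
def Spec_clean_sequnces (sequences : List String) (out : List String) : Prop := out = clean_sequnces_alt sequences
instance (sequences : List String) (out : List String) : Decidable (Spec_clean_sequnces sequences out) := by unfold Spec_clean_sequnces; infer_instance

-- ===== CLAIM (what is proved, stated in full; the proofs are below) =====
def Claim_equal_clean_sequnces : Prop := ∀ (sequences : List String), Dom_clean_sequnces sequences → Spec_clean_sequnces sequences (clean_sequnces sequences)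

-- ===== LEMMAS AND PROOFS =====

-- replace with a single-character pattern is a character map
theorem replace_go_single (o n : Char) (l : List Char) :
    ∀ (fuel : Nat) (acc : List Char), l.length ≤ fuel →
      PySem.Chars.replace.go [o] [n] fuel l acc
        = acc.reverse ++ l.map (fun c => if c = o then n else c) := by
  induction l with
  | nil =>
      intro fuel acc _
      cases fuel <;> simp [PySem.Chars.replace.go]
  | cons c t ih =>
      intro fuel acc hle
      cases fuel with
      | zero => simp at hle
      | succ f =>
          have hle' : t.length ≤ f := by simpa using hle
          by_cases h : c = o
          · subst h
            rw [show PySem.Chars.replace.go [c] [n] (f+1) (c :: t) acc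
                  = PySem.Chars.replace.go [c] [n] f t ([n].reverse ++ acc) by
                simp [PySem.Chars.replace.go, List.isPrefixOf]]
            rw [ih f _ hle']
            simp
          · have hp : ([o].isPrefixOf (c :: t)) = false := by
              simp [List.isPrefixOf]
              exact fun hco => h (by simpa using hco.symm)
            rw [show PySem.Chars.replace.go [o] [n] (f+1) (c :: t) acc
                  = PySem.Chars.replace.go [o] [n] f t (c :: acc) by
                simp [PySem.Chars.replace.go, hp]]
            rw [ih f _ hle']
            simp [h]

theorem replace_single (s : String) (o n : Char) :
    PySem.Str.replace s (String.ofList [o]) (String.ofList [n])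
      = String.ofList (s.toList.map (fun c => if c = o then n else c)) := by
  unfold PySem.Str.replace PySem.Chars.replace
  simp only [String.toList_ofList, List.isEmpty_cons, Bool.false_eq_true, if_false]
  rw [replace_go_single o n s.toList s.toList.length [] le_rfl]
  simp

theorem translate_of_not_key (c : Char)
    (h1 : ¬c='R') (h2 : ¬c='Y') (h3 : ¬c='M') (h4 : ¬c='K') (h5 : ¬c='S')
    (h6 : ¬c='W') (h7 : ¬c='H') (h8 : ¬c='B') (h9 : ¬c='V') (h10 : ¬c='D') :
    pvTranslate c = c := by
  have e1 : (c == 'R') = false := by simpa using h1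
  have e2 : (c == 'Y') = false := by simpa using h2
  have e3 : (c == 'M') = false := by simpa using h3
  have e4 : (c == 'K') = false := by simpa using h4
  have e5 : (c == 'S') = false := by simpa using h5
  have e6 : (c == 'W') = false := by simpa using h6
  have e7 : (c == 'H') = false := by simpa using h7
  have e8 : (c == 'B') = false := by simpa using h8
  have e9 : (c == 'V') = false := by simpa using h9
  have e10 : (c == 'D') = false := by simpa using h10
  simp [pvTranslate, pvTable, List.lookup, e1,e2,e3,e4,e5,e6,e7,e8,e9,e10]

-- the ten sequential single-character substitutions coincide with one table pass (per character)
theorem chain_eq_translate (c : Char) :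
    (fun c => if c = 'D' then 'G' else c)
      ((fun c => if c = 'V' then 'G' else c)
      ((fun c => if c = 'B' then 'G' else c)
      ((fun c => if c = 'H' then 'A' else c)
      ((fun c => if c = 'W' then 'A' else c)
      ((fun c => if c = 'S' then 'G' else c)
      ((fun c => if c = 'K' then 'G' else c)
      ((fun c => if c = 'M' then 'A' else c)
      ((fun c => if c = 'Y' then 'T' else c)
      ((fun c => if c = 'R' then 'G' else c) c)))))))))
    = pvTranslate c := by
  by_cases h : c ∈ ['R','Y','M','K','S','W','H','B','V','D']
  · fin_cases h <;> decide
  · simp only [List.mem_cons, List.not_mem_nil, or_false, not_or] at h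
    obtain ⟨h1,h2,h3,h4,h5,h6,h7,h8,h9,h10⟩ := h
    rw [translate_of_not_key c h1 h2 h3 h4 h5 h6 h7 h8 h9 h10]
    simp [h1,h2,h3,h4,h5,h6,h7,h8,h9,h10]

-- the ten nested character maps fuse into one table pass (per character list)
theorem maps_eq_translate (l : List Char) :
    ((((((((((l.map (fun c => if c = 'R' then 'G' else c)).map
      (fun c => if c = 'Y' then 'T' else c)).map
      (fun c => if c = 'M' then 'A' else c)).map
      (fun c => if c = 'K' then 'G' else c)).map
      (fun c => if c = 'S' then 'G' else c)).map
      (fun c => if c = 'W' then 'A' else c)).map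
      (fun c => if c = 'H' then 'A' else c)).map
      (fun c => if c = 'B' then 'G' else c)).map
      (fun c => if c = 'V' then 'G' else c)).map
      (fun c => if c = 'D' then 'G' else c))
    = l.map pvTranslate := by
  induction l with
  | nil => rfl
  | cons c t ih => simp only [List.map_cons, ih, chain_eq_translate]

-- the ten sequential replaces on one string equal one table pass
theorem per_string (s : String) :
    PySem.Str.replace (PySem.Str.replace (PySem.Str.replace (PySem.Str.replace
      (PySem.Str.replace (PySem.Str.replace (PySem.Str.replace (PySem.Str.replace
      (PySem.Str.replace (PySem.Str.replace s "R" "G") "Y" "T") "M" "A") "K" "G")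
      "S" "G") "W" "A") "H" "A") "B" "G") "V" "G") "D" "G"
    = String.ofList (s.toList.map pvTranslate) := by
  rw [show ("R":String) = String.ofList ['R'] from rfl, show ("Y":String) = String.ofList ['Y'] from rfl,
      show ("M":String) = String.ofList ['M'] from rfl, show ("K":String) = String.ofList ['K'] from rfl,
      show ("S":String) = String.ofList ['S'] from rfl, show ("W":String) = String.ofList ['W'] from rfl,
      show ("H":String) = String.ofList ['H'] from rfl, show ("B":String) = String.ofList ['B'] from rfl,
      show ("V":String) = String.ofList ['V'] from rfl, show ("D":String) = String.ofList ['D'] from rfl,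
      show ("G":String) = String.ofList ['G'] from rfl, show ("T":String) = String.ofList ['T'] from rfl,
      show ("A":String) = String.ofList ['A'] from rfl]
  simp only [replace_single, String.toList_ofList]
  rw [maps_eq_translate]

-- the ten list-wide passes of A equal B, one string at a time
theorem a_eq_b_strings (l : List String) :
    ((((((((((l.map (fun s => PySem.Str.replace s "R" "G")).map
      (fun s => PySem.Str.replace s "Y" "T")).map
      (fun s => PySem.Str.replace s "M" "A")).map
      (fun s => PySem.Str.replace s "K" "G")).map
      (fun s => PySem.Str.replace s "S" "G")).map
      (fun s => PySem.Str.replace s "W" "A")).map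
      (fun s => PySem.Str.replace s "H" "A")).map
      (fun s => PySem.Str.replace s "B" "G")).map
      (fun s => PySem.Str.replace s "V" "G")).map
      (fun s => PySem.Str.replace s "D" "G"))
    = clean_sequnces_alt l := by
  induction l with
  | nil => rfl
  | cons s t ih =>
      simp only [List.map_cons, clean_sequnces_alt] at *
      rw [ih, per_string]

-- ===== VERDICT (by name: the statement is the Claim_ definition above) =====
theorem clean_sequnces_spec : Claim_equal_clean_sequnces := by
  intro sequences _
  unfold Spec_clean_sequnces clean_sequnces
  simp only [List.zip_cons_cons, List.zip_nil_right, List.foldl_cons, List.foldl_nil]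
  exact a_eq_b_strings sequences
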